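-- pv_equiv track=rewrite | github.com/tomalulu/CLP-Recognition | splitlicenseplate/SplitLicensePlate.py | find_waves
-- ===== SOURCE A (Python) =====
-- def find_waves(threshold, histogram):
--     is_peak = False
--     up = -1
--     is_threshold = False
--     if histogram[0] > threshold:
--         up = 0
--         is_peak = True
--     wave_peaks = []
--     for index, index1 in enumerate(histogram):
--         if is_peak and index1 < threshold:
--             if index - up > 2:
--                 is_peak = False
--                 is_threshold = False
--                 wave_peaks.append((up, index))
--         elif not is_peak and index1 >= threshold:
--             is_peak = True
--             is_threshold = True
--             up = index
--     if is_peak and up != -1 and index - up > 4: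
--         wave_peaks.append((up, index))
--     return wave_peaks
-- ===== SOURCE B (Python) =====
-- def find_waves(threshold, histogram):
--     n = len(histogram)
--     # event lists: indices at-or-above threshold and below threshold, each sorted
--     above = [i for i in range(n) if histogram[i] >= threshold]
--     below = [i for i in range(n) if histogram[i] < threshold]
--     waves = []
--     ai = 0
--     bi = 0
--     while ai < len(above):
--         start = above[ai]
--         while bi < len(below) and below[bi] < start + 3:
--             bi += 1
--         if bi < len(below):
--             end = below[bi]
--             waves.append((start, end))
--         else:
--             if (n - 1) - start > 4:
--                 waves.append((start, n - 1))
--             break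
--         while ai < len(above) and above[ai] <= end:
--             ai += 1
--     return waves
-- ===== Notes on version B (the rewrite author's own statement) =====
-- stated objective: alternative
-- what changed: Instead of A's flag-driven single pass over the histogram, B first builds two sorted event-index lists (positions at-or-above and below threshold) in staged passes and then merges them with two pointers, pairing each wave start from the above-list with the first below-list index at least start+3.
import Mathlib
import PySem

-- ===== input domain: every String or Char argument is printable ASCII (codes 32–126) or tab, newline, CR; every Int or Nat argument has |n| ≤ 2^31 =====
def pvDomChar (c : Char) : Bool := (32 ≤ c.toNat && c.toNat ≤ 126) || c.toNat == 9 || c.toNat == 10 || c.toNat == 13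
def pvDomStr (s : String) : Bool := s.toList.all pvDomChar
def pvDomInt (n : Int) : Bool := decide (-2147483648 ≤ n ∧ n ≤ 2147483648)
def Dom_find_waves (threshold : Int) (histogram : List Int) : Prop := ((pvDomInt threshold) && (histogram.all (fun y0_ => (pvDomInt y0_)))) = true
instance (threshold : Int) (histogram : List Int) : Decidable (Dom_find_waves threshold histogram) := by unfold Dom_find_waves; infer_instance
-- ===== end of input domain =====

-- B replaces A's flag-driven single-pass state machine by staged passes: two sorted
-- event-index lists (at-or-above / below threshold) are built first and then merged
-- with two pointers; same O(n) cost, equal return value on nonempty input.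

-- ===== PORT A =====
-- one step of A's `for index, index1 in enumerate(histogram)` loop;
-- state = (is_peak, up, is_threshold, wave_peaks)
def fwStepA (threshold : Int) (st : Bool × Int × Bool × List (Int × Int))
    (p : Int × Int) : Bool × Int × Bool × List (Int × Int) :=
  let (isPeak, up, isTh, waves) := st
  if isPeak = true ∧ p.2 < threshold then
    if p.1 - up > 2 then (false, up, false, waves ++ [(up, p.1)]) else (isPeak, up, isTh, waves)
  else if ¬ isPeak = true ∧ p.2 ≥ threshold then
    (true, p.1, true, waves)
  else (isPeak, up, isTh, waves)

def find_waves (threshold : Int) (histogram : List Int) : List (Int × Int) :=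
  match PySem.List.pyGet? histogram 0 with
  | none => []  -- Python raises IndexError here; excluded by Pre_find_waves
  | some h0 =>
    let isPeak0 : Bool := decide (h0 > threshold)
    let up0 : Int := if h0 > threshold then 0 else -1
    let s := (PySem.List.enumerate histogram).foldl (fwStepA threshold) (isPeak0, up0, false, [])
    -- after the loop, `index` = last index = len - 1 (histogram nonempty here)
    let index : Int := (histogram.length : Int) - 1
    if s.1 = true ∧ s.2.1 ≠ -1 ∧ index - s.2.1 > 4 then s.2.2.2 ++ [(s.2.1, index)]
    else s.2.2.2

-- ===== PORT B =====
-- event lists: `above = [i for i in range(n) if histogram[i] >= threshold]`, `below = …`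
def bAbove (threshold : Int) (histogram : List Int) : List Nat :=
  (List.range histogram.length).filter (fun i => decide (histogram.getD i 0 ≥ threshold))
def bBelow (threshold : Int) (histogram : List Int) : List Nat :=
  (List.range histogram.length).filter (fun i => decide (histogram.getD i 0 < threshold))

-- `while bi < len(below) and below[bi] < start + 3: bi += 1`
-- (fuel, always passed as the list's length, bounds the loop; it merely makes the loop total)
def bSkipBelow (fuel : Nat) (below : List Nat) (bi bound : Nat) : Nat :=
  match fuel with
  | 0 => bi
  | fuel + 1 =>
    if bi < below.length then
      if below.getD bi 0 < bound then bSkipBelow fuel below (bi + 1) bound else bi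
    else bi

-- `while ai < len(above) and above[ai] <= end: ai += 1`
def bSkipAbove (fuel : Nat) (above : List Nat) (ai e : Nat) : Nat :=
  match fuel with
  | 0 => ai
  | fuel + 1 =>
    if ai < above.length then
      if above.getD ai 0 ≤ e then bSkipAbove fuel above (ai + 1) e else ai
    else ai

-- main merge loop over the two pointers (B's outer `while ai < len(above)`;
-- fuel = len(above) + 1 bounds it, since ai advances past each emitted wave's end)
def bGo (fuel n : Nat) (above below : List Nat) (ai bi : Nat)
    (waves : List (Int × Int)) : List (Int × Int) :=
  match fuel with
  | 0 => waves
  | fuel + 1 =>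
    if ai < above.length then
      let start := above.getD ai 0
      let bi' := bSkipBelow below.length below bi (start + 3)
      if bi' < below.length then
        let e := below.getD bi' 0
        bGo fuel n above below (bSkipAbove above.length above ai e) bi'
          (waves ++ [((start : Int), (e : Int))])
      else if ((n : Int) - 1) - (start : Int) > 4 then
        waves ++ [((start : Int), (n : Int) - 1)]
      else waves
    else waves

def find_waves_alt (threshold : Int) (histogram : List Int) : List (Int × Int) :=
  bGo ((bAbove threshold histogram).length + 1) histogram.length
    (bAbove threshold histogram) (bBelow threshold histogram) 0 0 []

-- ===== PRECONDITION & SPEC =====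
-- Pre_ excludes only the empty histogram, on which A raises IndexError at histogram[0].
def Pre_find_waves (threshold : Int) (histogram : List Int) : Prop := histogram ≠ []
instance (threshold : Int) (histogram : List Int) : Decidable (Pre_find_waves threshold histogram) := by unfold Pre_find_waves; infer_instance
def pvWitness_find_waves : Int × List Int := (2, [3, 3, 3, 0, 0, 0, 5])

def Spec_find_waves (threshold : Int) (histogram : List Int) (out : List (Int × Int)) : Prop := out = find_waves_alt threshold histogram
instance (threshold : Int) (histogram : List Int) (out : List (Int × Int)) : Decidable (Spec_find_waves threshold histogram out) := by unfold Spec_find_waves; infer_instance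

-- ===== CLAIM (what is proved, stated in full; the proofs are below) =====
def Claim_equal_find_waves : Prop := ∀ (threshold : Int) (histogram : List Int), Dom_find_waves threshold histogram → Pre_find_waves threshold histogram → Spec_find_waves threshold histogram (find_waves threshold histogram)

-- ===== LEMMAS AND PROOFS =====

-- A's inner/outer scan, an intermediate form used only by the proofs:
-- fwInner/fwOuter re-state A's state machine as an index scan; the claim is proved
-- by showing find_waves = fwOuter = bGo.
def fwInner (threshold : Int) (histogram : List Int) (start j : Nat) : Nat :=
  if h : j < histogram.length then
    if histogram.getD j 0 < threshold ∧ (j : Int) - (start : Int) > 2 then j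
    else fwInner threshold histogram start (j + 1)
  else j
termination_by histogram.length - j

theorem fwInner_ge (threshold : Int) (histogram : List Int) (start j : Nat) :
    j ≤ fwInner threshold histogram start j := by
  unfold fwInner
  split
  · split
    · exact le_refl j
    · exact le_trans (Nat.le_succ j) (fwInner_ge threshold histogram start (j + 1))
  · exact le_refl j
termination_by histogram.length - j

def fwOuter (threshold : Int) (histogram : List Int) (i : Nat)
    (waves : List (Int × Int)) : List (Int × Int) :=
  if hi : i < histogram.length then
    if histogram.getD i 0 < threshold then
      fwOuter threshold histogram (i + 1) waves
    else
      let start := i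
      let j := fwInner threshold histogram start (i + 1)
      let waves' :=
        if j < histogram.length then waves ++ [((start : Int), (j : Int))]
        else if ((histogram.length : Int) - 1) - (start : Int) > 4 then
          waves ++ [((start : Int), (histogram.length : Int) - 1)]
        else waves
      fwOuter threshold histogram (j + 1) waves'
  else waves
termination_by histogram.length - i
decreasing_by
  · omega
  · have := fwInner_ge threshold histogram i (i + 1); omega

-- A's post-loop fixup as a function of the final state
def fwFin (xs : List Int) (st : Bool × Int × Bool × List (Int × Int)) : List (Int × Int) :=
  if st.1 = true ∧ st.2.1 ≠ -1 ∧ ((xs.length : Int) - 1) - st.2.1 > 4 then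
    st.2.2.2 ++ [(st.2.1, (xs.length : Int) - 1)]
  else st.2.2.2

mutual
theorem fw_seek (t : Int) (xs : List Int) (j : Nat) (up : Int) (isTh : Bool)
    (waves : List (Int × Int)) :
    fwFin xs ((PySem.List.enumerate (xs.drop j) (j : Int)).foldl (fwStepA t)
        (false, up, isTh, waves)) = fwOuter t xs j waves := by
  by_cases hj : j < xs.length
  · rw [List.drop_eq_getElem_cons hj, PySem.List.enumerate_cons, List.foldl_cons]
    rw [fwOuter]
    simp only [hj, dif_pos]
    have hget : xs.getD j 0 = xs[j] := List.getD_eq_getElem xs 0 hj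
    by_cases hv : xs[j] < t
    · have hstep : fwStepA t (false, up, isTh, waves) ((j : Int), xs[j])
          = (false, up, isTh, waves) := by
        simp [fwStepA, hv, not_le.mpr hv]
      rw [hstep]
      have : ((j : Int) + 1) = ((j + 1 : Nat) : Int) := by push_cast; ring
      rw [this, fw_seek t xs (j + 1) up isTh waves, hget, if_pos hv]
    · have hstep : fwStepA t (false, up, isTh, waves) ((j : Int), xs[j])
          = (true, (j : Int), true, waves) := by
        simp [fwStepA, hv, not_lt.mp hv]
      rw [hstep]
      have : ((j : Int) + 1) = ((j + 1 : Nat) : Int) := by push_cast; ring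
      rw [this, fw_peak t xs (j + 1) j (Nat.lt_succ_self j) true waves, hget, if_neg hv]
  · have hd : xs.drop j = [] := List.drop_eq_nil_of_le (le_of_not_gt hj)
    rw [hd, PySem.List.enumerate_nil, List.foldl_nil, fwOuter]
    simp [fwFin, hj]
termination_by (xs.length - j, 0)

theorem fw_peak (t : Int) (xs : List Int) (j start : Nat) (hs : start < j) (isTh : Bool)
    (waves : List (Int × Int)) :
    fwFin xs ((PySem.List.enumerate (xs.drop j) (j : Int)).foldl (fwStepA t)
        (true, (start : Int), isTh, waves)) =
    fwOuter t xs (fwInner t xs start j + 1)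
      (if fwInner t xs start j < xs.length then
        waves ++ [((start : Int), (fwInner t xs start j : Int))]
       else if ((xs.length : Int) - 1) - (start : Int) > 4 then
        waves ++ [((start : Int), (xs.length : Int) - 1)]
       else waves) := by
  by_cases hj : j < xs.length
  · rw [List.drop_eq_getElem_cons hj, PySem.List.enumerate_cons, List.foldl_cons]
    have hget : xs.getD j 0 = xs[j] := List.getD_eq_getElem xs 0 hj
    by_cases hv : xs[j] < t
    · by_cases hgap : (j : Int) - (start : Int) > 2
      · have hstep : fwStepA t (true, (start : Int), isTh, waves) ((j : Int), xs[j])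
            = (false, (start : Int), false, waves ++ [((start : Int), (j : Int))]) := by
          simp [fwStepA, hv, hgap]
        rw [hstep]
        have : ((j : Int) + 1) = ((j + 1 : Nat) : Int) := by push_cast; ring
        rw [this, fw_seek t xs (j + 1) (start : Int) false (waves ++ [((start : Int), (j : Int))])]
        have hinner : fwInner t xs start j = j := by
          rw [fwInner]; simp [hj, hv, hgap]
        rw [hinner]
        simp [hj]
      · have hstep : fwStepA t (true, (start : Int), isTh, waves) ((j : Int), xs[j])
            = (true, (start : Int), isTh, waves) := by
          simp [fwStepA, hv, hgap]
        rw [hstep]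
        have hc : ((j : Int) + 1) = ((j + 1 : Nat) : Int) := by push_cast; ring
        rw [hc, fw_peak t xs (j + 1) start (Nat.lt_succ_of_lt hs) isTh waves]
        have hinner : fwInner t xs start j = fwInner t xs start (j + 1) := by
          conv_lhs => rw [fwInner]
          simp [hj, hv, hgap]
        rw [hinner]
    · have hstep : fwStepA t (true, (start : Int), isTh, waves) ((j : Int), xs[j])
          = (true, (start : Int), isTh, waves) := by
        simp [fwStepA, hv, not_lt.mp hv]
      rw [hstep]
      have hc : ((j : Int) + 1) = ((j + 1 : Nat) : Int) := by push_cast; ring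
      rw [hc, fw_peak t xs (j + 1) start (Nat.lt_succ_of_lt hs) isTh waves]
      have hinner : fwInner t xs start j = fwInner t xs start (j + 1) := by
        conv_lhs => rw [fwInner]
        simp [hj, hv]
      rw [hinner]
  · have hd : xs.drop j = [] := List.drop_eq_nil_of_le (le_of_not_gt hj)
    have hinner : fwInner t xs start j = j := by rw [fwInner]; simp [hj]
    rw [hd, PySem.List.enumerate_nil, List.foldl_nil, hinner, fwOuter]
    have hsn : ¬ (start : Int) = -1 := by omega
    simp only [fwFin]
    have h1 : ¬ j < xs.length := hj
    have h2 : ¬ j + 1 < xs.length := by omega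
    simp [h1, h2]
termination_by (xs.length - j, 1)
end

theorem find_waves_eq_fin (t x : Int) (rest : List Int) :
    find_waves t (x :: rest) =
      fwFin (x :: rest) ((PySem.List.enumerate (x :: rest) 0).foldl (fwStepA t)
        (decide (x > t), if x > t then 0 else -1, false, [])) := by
  rw [find_waves, PySem.List.pyGet?_zero_cons]
  rfl

theorem find_waves_eq_outer (t : Int) (xs : List Int) (hpre : xs ≠ []) :
    find_waves t xs = fwOuter t xs 0 [] := by
  match xs, hpre with
  | x :: rest, _ =>
    rw [find_waves_eq_fin]
    by_cases hx : x > t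
    · rw [PySem.List.enumerate_cons, List.foldl_cons]
      have hstep : fwStepA t (decide (x > t), if x > t then 0 else -1, false, []) (0, x)
          = (true, (0 : Int), false, []) := by
        simp [fwStepA, hx, not_lt.mpr (le_of_lt hx)]
      have hpk := fw_peak t (x :: rest) 1 0 Nat.zero_lt_one false []
      simp only [List.drop_succ_cons, List.drop_zero, Nat.cast_one, Nat.cast_zero] at hpk
      rw [hstep, show ((0 : Int) + 1) = 1 by norm_num, hpk]
      conv_rhs => rw [fwOuter]
      have hlen : 0 < (x :: rest).length := by simp
      have hg : (x :: rest).getD 0 0 = x := rfl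
      simp only [hlen, dif_pos, hg, if_neg (not_lt.mpr (le_of_lt hx)), Nat.zero_add, Nat.cast_zero]
    · have hsk := fw_seek t (x :: rest) 0 (-1) false []
      simp only [List.drop_zero, Nat.cast_zero] at hsk
      rw [show (decide (x > t), if x > t then (0 : Int) else -1, false,
            ([] : List (Int × Int))) = (false, (-1 : Int), false, ([] : List (Int × Int))) by
          simp [hx]]
      rw [hsk]

-- ---- relating B's event-list merge to fwOuter ----

-- the suffix of the filtered index range starting at m
def rFilt (P : Nat → Bool) (n m : Nat) : List Nat := (List.range' m (n - m)).filter P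

theorem rFilt_empty (P : Nat → Bool) (n m : Nat) (h : n ≤ m) : rFilt P n m = [] := by
  unfold rFilt
  rw [Nat.sub_eq_zero_of_le h]
  rfl

theorem rFilt_step (P : Nat → Bool) (n m : Nat) (h : m < n) :
    rFilt P n m = if P m then m :: rFilt P n (m + 1) else rFilt P n (m + 1) := by
  unfold rFilt
  rw [show n - m = (n - (m + 1)) + 1 by omega, List.range'_succ, List.filter_cons]

theorem head_of_drop (l : List Nat) (r y : Nat) (tl : List Nat) (h : l.drop r = y :: tl) :
    l.getD r 0 = y := by
  have hr : r < l.length := by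
    by_contra hc
    rw [List.drop_eq_nil_of_le (le_of_not_gt hc)] at h
    simp at h
  rw [List.drop_eq_getElem_cons hr] at h
  injection h with h1 _
  rw [List.getD_eq_getElem l 0 hr, h1]

theorem rFilt_head (P : Nat → Bool) (n m e : Nat) (tl : List Nat)
    (h : rFilt P n m = e :: tl) :
    m ≤ e ∧ e < n ∧ P e = true ∧ tl = rFilt P n (e + 1) := by
  by_cases hm : m < n
  · rw [rFilt_step P n m hm] at h
    by_cases hp : P m
    · rw [if_pos hp] at h
      injection h with h1 h2
      subst h1
      exact ⟨le_refl m, hm, hp, h2.symm⟩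
    · rw [if_neg hp] at h
      obtain ⟨a1, a2, a3, a4⟩ := rFilt_head P n (m + 1) e tl h
      exact ⟨by omega, a2, a3, a4⟩
  · rw [rFilt_empty P n m (le_of_not_gt hm)] at h
    simp at h
termination_by n - m

theorem rFilt_dropWhile_ge (P : Nat → Bool) (n m bound : Nat) (h : bound ≤ m) :
    (rFilt P n m).dropWhile (fun x => decide (x < bound)) = rFilt P n m := by
  by_cases hm : m < n
  · rw [rFilt_step P n m hm]
    by_cases hp : P m
    · rw [if_pos hp, List.dropWhile_cons, if_neg (by simp; omega)]
    · rw [if_neg hp]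
      exact rFilt_dropWhile_ge P n (m + 1) bound (by omega)
  · rw [rFilt_empty P n m (le_of_not_gt hm)]
    rfl
termination_by n - m

theorem rFilt_dropWhile_lt (P : Nat → Bool) (n m bound : Nat) (h : m ≤ bound) :
    (rFilt P n m).dropWhile (fun x => decide (x < bound)) = rFilt P n bound := by
  by_cases heq : m = bound
  · subst heq
    exact rFilt_dropWhile_ge P n m m (le_refl m)
  · have hlt : m < bound := lt_of_le_of_ne h heq
    by_cases hm : m < n
    · rw [rFilt_step P n m hm]
      by_cases hp : P m
      · rw [if_pos hp, List.dropWhile_cons, if_pos (by simpa using hlt)]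
        exact rFilt_dropWhile_lt P n (m + 1) bound hlt
      · rw [if_neg hp]
        exact rFilt_dropWhile_lt P n (m + 1) bound hlt
    · rw [rFilt_empty P n m (le_of_not_gt hm), rFilt_empty P n bound (by omega)]
      rfl
termination_by bound - m

theorem bSkipBelow_drop (below : List Nat) (fuel bi bound : Nat)
    (hf : below.length ≤ bi + fuel) :
    below.drop (bSkipBelow fuel below bi bound) =
      (below.drop bi).dropWhile (fun x => decide (x < bound)) := by
  induction fuel generalizing bi with
  | zero =>
    rw [bSkipBelow, List.drop_eq_nil_of_le (by omega)]
    rfl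
  | succ f ih =>
    by_cases h1 : bi < below.length
    · rw [List.drop_eq_getElem_cons h1, List.dropWhile_cons]
      by_cases h2 : below[bi] < bound
      · rw [bSkipBelow]
        simp only [h1, if_pos]
        rw [if_pos (by rw [List.getD_eq_getElem below 0 h1]; exact h2),
          if_pos (by simpa using h2)]
        exact ih (bi + 1) (by omega)
      · rw [bSkipBelow]
        simp only [h1, if_pos]
        rw [if_neg (by rw [List.getD_eq_getElem below 0 h1]; exact h2),
          if_neg (by simpa using h2)]
        exact List.drop_eq_getElem_cons h1
    · rw [bSkipBelow]
      simp only [h1, if_false]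
      rw [List.drop_eq_nil_of_le (le_of_not_gt h1)]
      rfl

theorem bSkipAbove_drop (above : List Nat) (fuel ai e : Nat)
    (hf : above.length ≤ ai + fuel) :
    above.drop (bSkipAbove fuel above ai e) =
      (above.drop ai).dropWhile (fun x => decide (x ≤ e)) := by
  induction fuel generalizing ai with
  | zero =>
    rw [bSkipAbove, List.drop_eq_nil_of_le (by omega)]
    rfl
  | succ f ih =>
    by_cases h1 : ai < above.length
    · rw [List.drop_eq_getElem_cons h1, List.dropWhile_cons]
      by_cases h2 : above[ai] ≤ e
      · rw [bSkipAbove]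
        simp only [h1, if_pos]
        rw [if_pos (by rw [List.getD_eq_getElem above 0 h1]; exact h2),
          if_pos (by simpa using h2)]
        exact ih (ai + 1) (by omega)
      · rw [bSkipAbove]
        simp only [h1, if_pos]
        rw [if_neg (by rw [List.getD_eq_getElem above 0 h1]; exact h2),
          if_neg (by simpa using h2)]
        exact List.drop_eq_getElem_cons h1
    · rw [bSkipAbove]
      simp only [h1, if_false]
      rw [List.drop_eq_nil_of_le (le_of_not_gt h1)]
      rfl

theorem bSkipAbove_ge (above : List Nat) (fuel ai e : Nat) :
    ai ≤ bSkipAbove fuel above ai e := by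
  induction fuel generalizing ai with
  | zero => exact le_refl ai
  | succ f ih =>
    rw [bSkipAbove]
    split
    · split
      · exact le_trans (Nat.le_succ ai) (ih (ai + 1))
      · exact le_refl ai
    · exact le_refl ai

theorem bSkipAbove_gt (above : List Nat) (fuel ai e : Nat) (hf : 0 < fuel)
    (h1 : ai < above.length) (h2 : above.getD ai 0 ≤ e) :
    ai < bSkipAbove fuel above ai e := by
  match fuel, hf with
  | f + 1, _ =>
    rw [bSkipAbove]
    simp only [h1, if_pos, h2]
    exact Nat.lt_of_lt_of_le (Nat.lt_succ_self ai) (bSkipAbove_ge above f (ai + 1) e)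


theorem fwInner_char (t : Int) (xs : List Int) (i j0 : Nat) (h1 : i < j0)
    (h2 : j0 ≤ xs.length) :
    fwInner t xs i j0 =
      (rFilt (fun k => decide (xs.getD k 0 < t)) xs.length (max j0 (i + 3))).headD
        xs.length := by
  by_cases hj : j0 < xs.length
  · rw [fwInner, dif_pos hj]
    by_cases hcond : xs.getD j0 0 < t ∧ (j0 : Int) - (i : Int) > 2
    · rw [if_pos hcond]
      have hmax : max j0 (i + 3) = j0 := by omega
      have h5 : xs[j0]?.getD 0 < t := hcond.1
      rw [hmax, rFilt_step _ _ _ hj]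
      simp [h5]
    · rw [if_neg hcond]
      rw [fwInner_char t xs i (j0 + 1) (by omega) hj]
      by_cases hge : i + 3 ≤ j0
      · have hp : ¬ xs.getD j0 0 < t := fun hc => hcond ⟨hc, by omega⟩
        have hm1 : max j0 (i + 3) = j0 := by omega
        have hm2 : max (j0 + 1) (i + 3) = j0 + 1 := by omega
        rw [hm1, hm2, rFilt_step _ _ _ hj, if_neg (by simpa using hp)]
      · have hm1 : max j0 (i + 3) = i + 3 := by omega
        have hm2 : max (j0 + 1) (i + 3) = i + 3 := by omega
        rw [hm1, hm2]
  · rw [fwInner, dif_neg hj, rFilt_empty _ _ _ (by omega)]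
    have hj0 : j0 = xs.length := by omega
    rw [hj0]
    rfl
termination_by xs.length - j0

theorem sim (t : Int) (xs : List Int) (fuel i m ai bi : Nat) (waves : List (Int × Int))
    (hm : m ≤ i)
    (hfuel : (bAbove t xs).length < fuel + ai)
    (ha : (bAbove t xs).drop ai = rFilt (fun k => decide (xs.getD k 0 ≥ t)) xs.length i)
    (hb : (bBelow t xs).drop bi = rFilt (fun k => decide (xs.getD k 0 < t)) xs.length m) :
    fwOuter t xs i waves = bGo fuel xs.length (bAbove t xs) (bBelow t xs) ai bi waves := by
  by_cases hi : i < xs.length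
  · by_cases hv : xs.getD i 0 < t
    · rw [fwOuter, dif_pos hi, if_pos hv]
      have ha' : (bAbove t xs).drop ai
          = rFilt (fun k => decide (xs.getD k 0 ≥ t)) xs.length (i + 1) := by
        rw [ha, rFilt_step _ _ _ hi, if_neg (by simpa using not_le.mpr hv)]
      exact sim t xs fuel (i + 1) m ai bi waves (by omega) hfuel ha' hb
    · have hvge : xs.getD i 0 ≥ t := not_lt.mp hv
      have haa : (bAbove t xs).drop ai
          = i :: rFilt (fun k => decide (xs.getD k 0 ≥ t)) xs.length (i + 1) := by
        rw [ha, rFilt_step _ _ _ hi, if_pos (by simpa using hvge)]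
      have hailt : ai < (bAbove t xs).length := by
        by_contra hc
        rw [List.drop_eq_nil_of_le (le_of_not_gt hc)] at haa
        simp at haa
      have hstart : (bAbove t xs).getD ai 0 = i := head_of_drop _ _ _ _ haa
      have hbdrop : (bBelow t xs).drop
            (bSkipBelow (bBelow t xs).length (bBelow t xs) bi (i + 3)) =
          rFilt (fun k => decide (xs.getD k 0 < t)) xs.length (i + 3) := by
        rw [bSkipBelow_drop _ _ _ _ (by omega), hb,
          rFilt_dropWhile_lt _ _ _ _ (by omega)]
      match fuel, (by omega : 0 < fuel) with
      | f + 1, _ =>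
      rw [fwOuter, dif_pos hi, if_neg hv, bGo]
      simp only [hailt, if_pos]
      simp only [hstart]
      rcases hE : rFilt (fun k => decide (xs.getD k 0 < t)) xs.length (i + 3)
        with _ | ⟨e, tl⟩
      · rw [hE] at hbdrop
        have hbl : ¬ bSkipBelow (bBelow t xs).length (bBelow t xs) bi (i + 3)
            < (bBelow t xs).length := by
          rw [List.drop_eq_nil_iff] at hbdrop
          omega
        have hinner : fwInner t xs i (i + 1) = xs.length := by
          rw [fwInner_char t xs i (i + 1) (by omega) hi,
            show max (i + 1) (i + 3) = i + 3 by omega, hE]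
          rfl
        rw [hinner, if_neg hbl, if_neg (lt_irrefl xs.length),
          fwOuter, dif_neg (by omega : ¬ xs.length + 1 < xs.length)]
      · rw [hE] at hbdrop
        obtain ⟨he1, he2, he3, he4⟩ := rFilt_head _ _ _ _ _ hE
        have hbl : bSkipBelow (bBelow t xs).length (bBelow t xs) bi (i + 3)
            < (bBelow t xs).length := by
          by_contra hc
          rw [List.drop_eq_nil_of_le (le_of_not_gt hc)] at hbdrop
          simp at hbdrop
        have hend : (bBelow t xs).getD
            (bSkipBelow (bBelow t xs).length (bBelow t xs) bi (i + 3)) 0 = e :=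
          head_of_drop _ _ _ _ hbdrop
        have hinner : fwInner t xs i (i + 1) = e := by
          rw [fwInner_char t xs i (i + 1) (by omega) hi,
            show max (i + 1) (i + 3) = i + 3 by omega, hE]
          rfl
        rw [hinner, if_pos hbl]
        simp only [hend]
        rw [if_pos he2]
        have hgt : ai < bSkipAbove (bAbove t xs).length (bAbove t xs) ai e :=
          bSkipAbove_gt _ _ _ _ (by omega) hailt (by omega)
        have ha2 : (bAbove t xs).drop (bSkipAbove (bAbove t xs).length (bAbove t xs) ai e) =
            rFilt (fun k => decide (xs.getD k 0 ≥ t)) xs.length (e + 1) := by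
          rw [bSkipAbove_drop _ _ _ _ (by omega), ha,
            show (fun x => decide (x ≤ e)) = (fun x : Nat => decide (x < e + 1)) from
              funext (fun x => by rw [decide_eq_decide]; omega),
            rFilt_dropWhile_lt _ _ _ _ (by omega)]
        have hb2 : (bBelow t xs).drop
              (bSkipBelow (bBelow t xs).length (bBelow t xs) bi (i + 3)) =
            rFilt (fun k => decide (xs.getD k 0 < t)) xs.length e := by
          rw [hbdrop, rFilt_step _ _ _ he2, if_pos he3, he4]
        exact sim t xs f (e + 1) e (bSkipAbove (bAbove t xs).length (bAbove t xs) ai e)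
          (bSkipBelow (bBelow t xs).length (bBelow t xs) bi (i + 3))
          (waves ++ [((i : Int), (e : Int))]) (by omega) (by omega) ha2 hb2
  · rw [fwOuter, dif_neg hi]
    have hnil : ¬ ai < (bAbove t xs).length := by
      have h0 : (bAbove t xs).drop ai = [] := by
        rw [ha]
        exact rFilt_empty _ _ _ (le_of_not_gt hi)
      exact not_lt.mpr (List.drop_eq_nil_iff.mp h0)
    match fuel with
    | 0 => rw [bGo]
    | f + 1 => rw [bGo]; simp only [hnil, if_false]
termination_by xs.length + 1 - i
decreasing_by
  · omega
  · omega

theorem alt_eq_outer (t : Int) (xs : List Int) :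
    fwOuter t xs 0 [] = find_waves_alt t xs := by
  rw [find_waves_alt]
  exact sim t xs ((bAbove t xs).length + 1) 0 0 0 0 [] (le_refl 0) (by omega)
    (by simp [bAbove, rFilt, List.range_eq_range'])
    (by simp [bBelow, rFilt, List.range_eq_range'])

-- ===== VERDICT (by name: the statement is the Claim_ definition above) =====
theorem find_waves_spec : Claim_equal_find_waves := by
  intro t xs _ hpre
  unfold Spec_find_waves
  rw [find_waves_eq_outer t xs hpre, alt_eq_outer]
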